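-- pv_equiv track=rewrite | github.com/DragunWF/Competitive-Programming | CodeWars/python/5_kyu/tongues.py | tongues
-- ===== SOURCE A (Python) =====
-- def tongues(code: str) -> str:
--     SPECIAL_VOWELS = 'aiyeou'
--     CONSONANTS = 'bkxznhdcwgpvjqtsrlmf'
--     output = []
--     for char in code:
--         if char.lower() in SPECIAL_VOWELS:
--             output.append(encrypt_char(char, 3, SPECIAL_VOWELS))
--         elif char.lower() in CONSONANTS:
--             output.append(encrypt_char(char, 10, CONSONANTS))
--         else:
--             output.append(char)
--     return "".join(output)
--
-- def encrypt_char(char: str, key: int, pool: str) -> str: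
--     new_index = (pool.index(char.lower()) + key) % len(pool)
--     letter = pool[new_index]
--     return letter.upper() if char.isupper() else letter
-- ===== SOURCE B (Python) =====
-- def tongues(code: str) -> str:
--     table = {}
--     for pool, key in (('aiyeou', 3), ('bkxznhdcwgpvjqtsrlmf', 10)):
--         n = len(pool)
--         for i, ch in enumerate(pool):
--             sub = pool[(i + key) % n]
--             table[ch] = sub
--             table[ch.upper()] = sub.upper()
--     return code.translate(str.maketrans(table))
-- ===== Notes on version B (the rewrite author's own statement) =====
-- stated objective: faster
-- what changed: B precomputes one translation dict mapping all 52 shifted letters (both cases) from the two pools and their keys, then does a single branchless str.translate pass, replacing A's per-character branch plus pool.index scan.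
import Mathlib
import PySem

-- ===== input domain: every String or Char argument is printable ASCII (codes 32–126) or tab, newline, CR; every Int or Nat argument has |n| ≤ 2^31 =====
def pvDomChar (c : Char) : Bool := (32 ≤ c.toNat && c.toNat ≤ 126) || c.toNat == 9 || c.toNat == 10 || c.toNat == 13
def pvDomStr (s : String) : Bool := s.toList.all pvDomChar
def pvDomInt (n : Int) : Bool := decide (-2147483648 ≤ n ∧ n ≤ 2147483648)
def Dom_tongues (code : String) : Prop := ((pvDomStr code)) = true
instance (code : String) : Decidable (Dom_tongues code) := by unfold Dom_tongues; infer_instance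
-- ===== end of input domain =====

set_option maxRecDepth 8192
set_option maxHeartbeats 1000000


-- B replaces A's per-character branch-and-index-scan by one precomputed translation table
-- (all 52 shifted letters, both cases) and a single branchless lookup pass (objective: idiomatic).

-- ===== PORT A =====
def pvVowels : List Char := "aiyeou".toList
def pvConsonants : List Char := "bkxznhdcwgpvjqtsrlmf".toList

-- encrypt_char(char, key, pool); pool.index never fails on A's call sites (membership checked), so getD 0 is never the default
def encryptChar (c : Char) (key : Int) (pool : List Char) : Char :=
  let newIndex := PySem.Int.mod (((PySem.List.index? pool (PySem.Chars.lowerChar c)).getD 0 : Int) + key) (pool.length : Int)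
  let letter := PySem.List.pyGetD pool newIndex ' '
  if PySem.Chars.isupper c then PySem.Chars.upperChar letter else letter

def tongues (code : String) : String :=
  String.mk (code.toList.foldl (fun out c =>
    if PySem.Chars.isIn [PySem.Chars.lowerChar c] pvVowels then
      out ++ [encryptChar c 3 pvVowels]
    else if PySem.Chars.isIn [PySem.Chars.lowerChar c] pvConsonants then
      out ++ [encryptChar c 10 pvConsonants]
    else
      out ++ [c]) [])

-- ===== PORT B =====
def tonguesTable : PySem.Dict Char Char :=
  [("aiyeou".toList, (3 : Int)), ("bkxznhdcwgpvjqtsrlmf".toList, (10 : Int))].foldl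
    (fun d pk =>
      (PySem.List.enumerate pk.1 0).foldl (fun d ic =>
        let sub := PySem.List.pyGetD pk.1 (PySem.Int.mod (ic.1 + pk.2) (pk.1.length : Int)) ' '
        (d.insert ic.2 sub).insert (PySem.Chars.upperChar ic.2) (PySem.Chars.upperChar sub)) d)
    PySem.Dict.empty

def tongues_alt (code : String) : String :=
  String.mk (code.toList.map (fun c => tonguesTable.getD c c))

-- ===== PRECONDITION & SPEC =====
def Spec_tongues (code : String) (out : String) : Prop := out = tongues_alt code
instance (code : String) (out : String) : Decidable (Spec_tongues code out) := by unfold Spec_tongues; infer_instance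

-- ===== CLAIM (what is proved, stated in full; the proofs are below) =====
def Claim_equal_tongues : Prop := ∀ (code : String), Dom_tongues code → Spec_tongues code (tongues code)

-- ===== LEMMAS AND PROOFS =====
-- A's per-character step, factored out for the proof
def pvStepA (c : Char) : Char :=
  if PySem.Chars.isIn [PySem.Chars.lowerChar c] pvVowels then encryptChar c 3 pvVowels
  else if PySem.Chars.isIn [PySem.Chars.lowerChar c] pvConsonants then encryptChar c 10 pvConsonants
  else c

theorem pvStepA_eq_table_of_lt (n : Nat) (hn : n < 127) :
    pvStepA (Char.ofNat n) = tonguesTable.getD (Char.ofNat n) (Char.ofNat n) := by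
  have h : (List.range 127).all
      (fun n => pvStepA (Char.ofNat n) == tonguesTable.getD (Char.ofNat n) (Char.ofNat n)) = true := by
    decide
  have := List.all_eq_true.mp h n (List.mem_range.mpr hn)
  exact eq_of_beq this

theorem pvStepA_eq_table (c : Char) (hc : pvDomChar c = true) :
    pvStepA c = tonguesTable.getD c c := by
  have hlt : c.toNat < 127 := by
    unfold pvDomChar at hc
    simp only [Bool.or_eq_true, Bool.and_eq_true, decide_eq_true_eq, beq_iff_eq] at hc
    omega
  have := pvStepA_eq_table_of_lt c.toNat hlt
  rwa [Char.ofNat_toNat] at this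

theorem tongues_eq_map (code : String) :
    tongues code = String.mk (code.toList.map pvStepA) := by
  unfold tongues
  congr 1
  have hfun : (fun (out : List Char) c =>
      if PySem.Chars.isIn [PySem.Chars.lowerChar c] pvVowels then
        out ++ [encryptChar c 3 pvVowels]
      else if PySem.Chars.isIn [PySem.Chars.lowerChar c] pvConsonants then
        out ++ [encryptChar c 10 pvConsonants]
      else
        out ++ [c]) = (fun out c => out ++ [pvStepA c]) := by
    funext out c
    unfold pvStepA
    split_ifs <;> rfl
  rw [hfun, PySem.List.foldl_append_singleton_eq_map]
  simp

-- ===== VERDICT (by name: the statement is the Claim_ definition above) =====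
theorem tongues_spec : Claim_equal_tongues := by
  intro code hdom
  unfold Spec_tongues tongues_alt
  rw [tongues_eq_map]
  congr 1
  apply List.map_congr_left
  intro c hc
  exact pvStepA_eq_table c (List.all_eq_true.mp hdom c hc)
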